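-- pv_equiv track=rewrite | github.com/yutsang/yucode | coding_agent/security/bash_validation.py | extract_first_command
-- ===== SOURCE A (Python) =====
-- def extract_first_command(command: str) -> str:
--     """Return the first real command token, skipping ``KEY=val`` env prefixes.
--
--     Examples:
--         ``FOO=bar ls``           -> ``ls``
--         ``A=1 B=2 rm -rf /tmp``  -> ``rm``
--         ``sudo -n systemctl``    -> ``sudo`` (caller handles sudo unwrap)
--     """
--     tokens = command.strip().split()
--     for tok in tokens:
--         if "=" in tok:
--             name, _, _ = tok.partition("=")
--             if name and all(c.isalnum() or c == "_" for c in name):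
--                 continue
--         return tok
--     return ""
-- ===== SOURCE B (Python) =====
-- import re
--
-- # One anchored regex consumes the whole prefix of NAME=value env-assignment
-- # tokens in a single engine pass and captures the first real command token.
-- # NAME is [A-Za-z0-9_]+ (== str.isalnum or '_' on ASCII input); the separator
-- # alternative (?:\s+|$) lets a trailing assignment token be skipped too, and
-- # the optional capture group yields None (-> '') when only assignments remain.
-- _FIRST_CMD = re.compile(r'^(?:[A-Za-z0-9_]+=\S*(?:\s+|$))*(\S+)?')
--
--
-- def extract_first_command(command: str) -> str:
--     m = _FIRST_CMD.match(command.strip())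
--     return m.group(1) or ""
-- ===== Notes on version B (the rewrite author's own statement) =====
-- stated objective: idiomatic
-- what changed: B replaces A's strip/split/token-loop with char-by-char env-name validation by a single precompiled anchored regex that consumes the whole KEY=value prefix in one engine pass and captures the first real command token.
import Mathlib
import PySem

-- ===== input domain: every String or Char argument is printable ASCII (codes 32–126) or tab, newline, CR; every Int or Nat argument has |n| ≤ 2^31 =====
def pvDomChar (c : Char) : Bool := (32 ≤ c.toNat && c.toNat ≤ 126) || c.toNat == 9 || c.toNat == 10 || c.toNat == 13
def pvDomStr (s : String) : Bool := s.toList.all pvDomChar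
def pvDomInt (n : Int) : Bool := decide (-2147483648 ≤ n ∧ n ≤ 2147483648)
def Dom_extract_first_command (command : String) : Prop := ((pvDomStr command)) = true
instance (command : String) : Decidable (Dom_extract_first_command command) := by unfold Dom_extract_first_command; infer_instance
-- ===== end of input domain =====

-- B replaces A's token-by-token loop by one anchored-regex match that consumes the whole
-- env-assignment prefix and captures the first real token; same return value, no side effects.

-- ===== PORT A =====
-- the loop body's env test: '"=" in tok' then 'name, _, _ = tok.partition("=")'
-- (name = chars before the FIRST '='; exact here since '=' is in tok), then
-- 'name and all(c.isalnum() or c == "_" for c in name)'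
def pvEnvSkipA (tok : String) : Bool :=
  if PySem.Str.isIn "=" tok then
    let name := tok.toList.takeWhile (fun c => c ≠ '=')
    !name.isEmpty && name.all (fun c => PySem.Chars.isalnum c || c == '_')
  else false

-- 'for tok in tokens: … continue / return tok' / 'return ""'
def pvGoA : List String → String
  | [] => ""
  | tok :: rest => if pvEnvSkipA tok then pvGoA rest else tok

def extract_first_command (command : String) : String :=
  pvGoA (PySem.Str.split₀ (PySem.Str.strip command))

-- ===== PORT B =====
-- Source B matches the anchored regex  ^(?:[A-Za-z0-9_]+=\S*(?:\s+|$))*(\S+)?  against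
-- command.strip().  There is no regex engine in Lean, so the engine's run on THIS fixed
-- pattern is ported by hand, step for step; this is exact because for this pattern the
-- greedy choices never need backtracking:
--   · [A-Za-z0-9_]+ greedily takes the maximal word run; a shorter run would have to be
--     followed by '=', but the next char is then a word char, so no alternative matches;
--   · \S* takes the rest of the token up to whitespace/end, and (?:\s+|$) then consumes
--     the whole whitespace run (giving characters back could only feed them to
--     [A-Za-z0-9_] or \S, which both reject whitespace);
--   · the star stops at the first iteration that fails, and (\S+)? then matches the next
--     token, or nothing (group = None -> "") at end of input.
-- The char class [A-Za-z0-9_] is PySem.Chars.isalnum (ASCII alnum) plus underscore, and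
-- \s/\S agree with PySem.Chars.isspace on the chars the matched string can contain.
def pvIsWord (c : Char) : Bool := PySem.Chars.isalnum c || c == '_'

-- the star loop (?:[A-Za-z0-9_]+=\S*(?:\s+|$))* : returns the unconsumed remainder
def pvStar (cs : List Char) : List Char :=
  if h : cs.takeWhile pvIsWord ≠ [] ∧ (cs.drop (cs.takeWhile pvIsWord).length).head? = some '=' then
    -- one iteration: NAME, '=', \S* (rest of the token), then the \s+ / $ separator
    pvStar (((cs.drop ((cs.takeWhile pvIsWord).length + 1)).dropWhile
        (fun d => !PySem.Chars.isspace d)).dropWhile PySem.Chars.isspace)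
  else cs
termination_by cs.length
decreasing_by
  have h1 := List.length_dropWhile_le PySem.Chars.isspace
    ((cs.drop ((cs.takeWhile pvIsWord).length + 1)).dropWhile (fun d => !PySem.Chars.isspace d))
  have h2 := List.length_dropWhile_le (fun d => !PySem.Chars.isspace d)
    (cs.drop ((cs.takeWhile pvIsWord).length + 1))
  have h3 : (cs.takeWhile pvIsWord).length ≠ 0 :=
    fun h0 => h.1 (List.length_eq_zero_iff.mp h0)
  have h4 : cs.drop (cs.takeWhile pvIsWord).length ≠ [] := by
    intro hnil; rw [hnil] at h; simp at h
  have h5 : ¬ (cs.length ≤ (cs.takeWhile pvIsWord).length) :=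
    fun hle => h4 (List.drop_eq_nil_iff.mpr hle)
  simp only [List.length_drop] at *
  omega

-- m.group(1) or "" : the (\S+)? capture on the remainder, or "" when it matched nothing
def extract_first_command_alt (command : String) : String :=
  let rem := pvStar (PySem.Chars.strip command.toList)
  String.ofList (rem.takeWhile (fun d => !PySem.Chars.isspace d))

-- ===== PRECONDITION & SPEC =====
def Spec_extract_first_command (command : String) (out : String) : Prop := out = extract_first_command_alt command
instance (command : String) (out : String) : Decidable (Spec_extract_first_command command out) := by unfold Spec_extract_first_command; infer_instance

-- ===== CLAIM (what is proved, stated in full; the proofs are below) =====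
def Claim_equal_extract_first_command : Prop := ∀ (command : String), Dom_extract_first_command command → Spec_extract_first_command command (extract_first_command command)

-- ===== LEMMAS AND PROOFS =====

theorem pv_env_core (l : List Char) :
    (decide ('=' ∈ l) && (l.takeWhile (fun c => c ≠ '=')).all (fun c => PySem.Chars.isalnum c || c == '_'))
      = ((l.drop (l.takeWhile pvIsWord).length).head? == some '=') := by
  induction l with
  | nil => simp
  | cons c t ih =>
    by_cases hce : c = '='
    · subst hce
      have hw : pvIsWord '=' = false := by decide
      simp [hw]
    · by_cases hcw : pvIsWord c = true
      · rw [List.takeWhile_cons_of_pos (p := fun c => decide ¬(c = '=')) (by simpa using hce),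
          List.takeWhile_cons_of_pos (p := pvIsWord) hcw]
        simp only [List.length_cons, List.drop_succ_cons, List.all_cons]
        rw [← ih]
        have hmem : decide ('=' ∈ c :: t) = decide ('=' ∈ t) := by
          simp [List.mem_cons, Ne.symm hce]
        have hthis : (PySem.Chars.isalnum c || c == '_') = true := hcw
        rw [hmem, hthis]
        simp
      · have hwf : pvIsWord c = false := by simpa using hcw
        rw [List.takeWhile_cons_of_neg (p := pvIsWord) (by simp [hwf]),
          List.takeWhile_cons_of_pos (p := fun c => decide ¬(c = '=')) (by simpa using hce)]
        simp only [List.length_nil, List.drop_zero, List.head?_cons, List.all_cons]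
        have hthis : (PySem.Chars.isalnum c || c == '_') = false := by
          simpa [pvIsWord] using hwf
        simp [hthis, hce]

theorem pv_env (tok : List Char) :
    pvEnvSkipA (String.ofList tok)
      = (decide (tok.takeWhile pvIsWord ≠ []) && ((tok.drop (tok.takeWhile pvIsWord).length).head? == some '=')) := by
  have hIn : PySem.Str.isIn "=" (String.ofList tok) = decide ('=' ∈ tok) := by
    by_cases hm : '=' ∈ tok
    · simp only [hm, decide_true]
      have : ("=" : String).toList <:+: tok := by
        simpa using (List.singleton_infix_iff '=' tok).mpr hm
      rw [show PySem.Str.isIn "=" (String.ofList tok) = PySem.Chars.isIn "=".toList tok by simp]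
      exact (PySem.Chars.isIn_iff_infix _ _).mpr this
    · simp only [hm, decide_false]
      rw [show PySem.Str.isIn "=" (String.ofList tok) = PySem.Chars.isIn "=".toList tok by simp]
      exact (PySem.Chars.isIn_eq_false_iff _ _).mpr (by
        intro hinf
        exact hm ((List.singleton_infix_iff '=' tok).mp (by simpa using hinf)))
  unfold pvEnvSkipA
  rw [hIn]
  by_cases hm : '=' ∈ tok
  · simp only [hm, decide_true, if_true, String.toList_ofList]
    cases tok with
    | nil => simp at hm
    | cons c t =>
      by_cases hce : c = '='
      · subst hce
        rw [List.takeWhile_cons_of_neg (p := fun c => decide ¬(c = '=')) (by simp),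
          List.takeWhile_cons_of_neg (p := pvIsWord) (by decide)]
        simp
      · have hcore := pv_env_core (c :: t)
        rw [show decide ('=' ∈ c :: t) = true by simp [hm]] at hcore
        rw [Bool.true_and] at hcore
        rw [List.takeWhile_cons_of_pos (p := fun c => decide ¬(c = '=')) (by simpa using hce)]
        by_cases hcw : pvIsWord c = true
        · rw [← hcore, List.takeWhile_cons_of_pos (p := pvIsWord) hcw]
          have hthis : (PySem.Chars.isalnum c || c == '_') = true := hcw
          rw [List.takeWhile_cons_of_pos (p := fun c => decide (c ≠ '=')) (by simpa using hce)]
          simp [hthis]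
        · have hwf : pvIsWord c = false := by simpa using hcw
          rw [List.takeWhile_cons_of_neg (p := pvIsWord) (by simp [hwf])]
          have hthis : (PySem.Chars.isalnum c || c == '_') = false := by simpa [pvIsWord] using hwf
          simp [hthis]
  · simp only [hm, decide_false, Bool.false_eq]
    have hcore := pv_env_core tok
    rw [show decide ('=' ∈ tok) = false by simp [hm]] at hcore
    rw [Bool.false_and] at hcore
    rw [← hcore]
    simp

theorem pv_word_nonspace (c : Char) (h : pvIsWord c = true) : PySem.Chars.isspace c = false := by
  simp only [pvIsWord, PySem.Chars.isalnum, PySem.Chars.isalpha, PySem.Chars.isdigit,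
    PySem.Chars.isupper, PySem.Chars.islower, PySem.Chars.isspace, Char.le_def,
    UInt32.le_iff_toNat_le, Char.toNat_val, beq_iff_eq, Bool.or_eq_true, Bool.and_eq_true,
    decide_eq_true_eq, Bool.or_eq_false_iff, Bool.and_eq_false_iff, decide_eq_false_iff_not] at *
  have h9 : ('9':Char).toNat = 57 := by decide
  have h0 : ('0':Char).toNat = 48 := by decide
  have hA : ('A':Char).toNat = 65 := by decide
  have hZ : ('Z':Char).toNat = 90 := by decide
  have ha : ('a':Char).toNat = 97 := by decide
  have hz : ('z':Char).toNat = 122 := by decide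
  rcases h with ((h|h)|h)|h
  · rw [hA, hZ] at h; omega
  · rw [ha, hz] at h; omega
  · rw [h0, h9] at h; omega
  · subst h; decide

theorem pv_takeWhile_word (l : List Char) :
    (l.takeWhile (fun d => !PySem.Chars.isspace d)).takeWhile pvIsWord = l.takeWhile pvIsWord := by
  induction l with
  | nil => rfl
  | cons c t ih =>
    by_cases hw : pvIsWord c = true
    · rw [List.takeWhile_cons_of_pos (p := fun d => !PySem.Chars.isspace d) (by simp [pv_word_nonspace c hw]),
        List.takeWhile_cons_of_pos (p := pvIsWord) hw, List.takeWhile_cons_of_pos (p := pvIsWord) hw, ih]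
    · have hwf : pvIsWord c = false := by simpa using hw
      by_cases hs : PySem.Chars.isspace c = true
      · rw [List.takeWhile_cons_of_neg (p := fun d => !PySem.Chars.isspace d) (by simp [hs]),
          List.takeWhile_cons_of_neg (p := pvIsWord) (by simp [hwf])]
        rfl
      · rw [List.takeWhile_cons_of_pos (p := fun d => !PySem.Chars.isspace d) (by simp [hs]),
          List.takeWhile_cons_of_neg (p := pvIsWord) (by simp [hwf]),
          List.takeWhile_cons_of_neg (p := pvIsWord) (by simp [hwf])]

theorem pv_drop_head (l : List Char) :
    (((l.takeWhile (fun d => !PySem.Chars.isspace d)).drop (l.takeWhile pvIsWord).length).head? == some '=')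
      = ((l.drop (l.takeWhile pvIsWord).length).head? == some '=') := by
  induction l with
  | nil => rfl
  | cons c t ih =>
    by_cases hw : pvIsWord c = true
    · rw [List.takeWhile_cons_of_pos (p := pvIsWord) hw,
        List.takeWhile_cons_of_pos (p := fun d => !PySem.Chars.isspace d) (by simp [pv_word_nonspace c hw])]
      simpa using ih
    · have hwf : pvIsWord c = false := by simpa using hw
      rw [List.takeWhile_cons_of_neg (p := pvIsWord) (by simp [hwf])]
      by_cases hs : PySem.Chars.isspace c = true
      · rw [List.takeWhile_cons_of_neg (p := fun d => !PySem.Chars.isspace d) (by simp [hs])]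
        have : c ≠ '=' := by intro h; subst h; exact absurd hs (by decide)
        simp [this]
      · rw [List.takeWhile_cons_of_pos (p := fun d => !PySem.Chars.isspace d) (by simp [hs])]
        simp

theorem pv_dropWhile_skip (l1 l2 : List Char) (h : ∀ c ∈ l1, PySem.Chars.isspace c = false) :
    (l1 ++ l2).dropWhile (fun d => !PySem.Chars.isspace d) = l2.dropWhile (fun d => !PySem.Chars.isspace d) := by
  induction l1 with
  | nil => rfl
  | cons c t ih =>
    rw [List.cons_append, List.dropWhile_cons_of_pos (by simp [h c (by simp)])]
    exact ih (fun d hd => h d (by simp [hd]))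


theorem pv_go_acc (cs : List Char) : ∀ cur acc, PySem.Chars.split₀.go cs cur acc = acc.reverse ++ PySem.Chars.split₀.go cs cur [] := by
  induction cs with
  | nil => intro cur acc; simp [PySem.Chars.split₀.go]; split <;> simp
  | cons c rest ih =>
    intro cur acc
    simp only [PySem.Chars.split₀.go]
    split
    · split
      · rw [ih [] acc]
      · rw [ih [] (cur.reverse :: acc), ih [] [cur.reverse]]; simp
    · rw [ih (c :: cur) acc]

theorem pv_go_cur (cs : List Char) : ∀ cur, cur ≠ [] →
    PySem.Chars.split₀.go cs cur [] =
      (cur.reverse ++ cs.takeWhile (fun d => !PySem.Chars.isspace d)) ::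
        PySem.Chars.split₀ (cs.dropWhile (fun d => !PySem.Chars.isspace d)) := by
  induction cs with
  | nil => intro cur h; simp [PySem.Chars.split₀.go, PySem.Chars.split₀, h]
  | cons c rest ih =>
    intro cur h
    by_cases hc : PySem.Chars.isspace c = true
    · simp only [PySem.Chars.split₀.go, hc, if_true, List.isEmpty_iff]
      rw [if_neg h, pv_go_acc]
      simp [hc, PySem.Chars.split₀, PySem.Chars.split₀.go]
    · simp only [PySem.Chars.split₀.go, hc]
      rw [ih (c :: cur) (by simp)]
      simp [hc]

theorem pv_split_nil : PySem.Chars.split₀ [] = [] := rfl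

theorem pv_split_space {c : Char} (hc : PySem.Chars.isspace c = true) (rest : List Char) :
    PySem.Chars.split₀ (c :: rest) = PySem.Chars.split₀ rest := by
  simp [PySem.Chars.split₀, PySem.Chars.split₀.go, hc]

theorem pv_split_word {c : Char} (hc : PySem.Chars.isspace c = false) (rest : List Char) :
    PySem.Chars.split₀ (c :: rest) =
      (c :: rest.takeWhile (fun d => !PySem.Chars.isspace d)) ::
        PySem.Chars.split₀ (rest.dropWhile (fun d => !PySem.Chars.isspace d)) := by
  simp only [PySem.Chars.split₀, PySem.Chars.split₀.go, hc]
  rw [pv_go_cur rest [c] (by simp)]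
  simp [PySem.Chars.split₀]

theorem pv_split_lstrip (cs : List Char) :
    PySem.Chars.split₀ (cs.dropWhile PySem.Chars.isspace) = PySem.Chars.split₀ cs := by
  induction cs with
  | nil => rfl
  | cons c rest ih =>
    by_cases hc : PySem.Chars.isspace c = true
    · rw [List.dropWhile_cons_of_pos hc, pv_split_space hc]; exact ih
    · rw [List.dropWhile_cons_of_neg (by simp [hc])]

theorem pv_dropWhile_eq_drop (p : Char → Bool) (l : List Char) :
    l.dropWhile p = l.drop (l.takeWhile p).length := by
  calc l.dropWhile p
      = List.drop (l.takeWhile p).length (l.takeWhile p ++ l.dropWhile p) :=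
        (List.drop_left' rfl).symm
    _ = l.drop (l.takeWhile p).length := by
        rw [List.takeWhile_append_dropWhile]

theorem pv_strip_head (l : List Char) (c : Char)
    (h : (PySem.Chars.strip l).head? = some c) : PySem.Chars.isspace c = false := by
  rw [PySem.Chars.strip] at h
  set L := PySem.Chars.lstrip l with hL
  have hpre : PySem.Chars.rstrip L <+: L := by
    rw [PySem.Chars.rstrip]
    have h2 := (List.dropWhile_suffix (l := L.reverse) PySem.Chars.isspace).reverse
    simpa using h2
  have hLhead : L.head? = some c := by
    obtain ⟨t, ht⟩ := hpre
    cases hr : PySem.Chars.rstrip L with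
    | nil => rw [hr] at h; simp at h
    | cons a u =>
      rw [hr] at h ht
      simp at h
      rw [← ht, h]
      rfl
  rw [hL, PySem.Chars.lstrip] at hLhead
  have hmatch := List.head?_dropWhile_not PySem.Chars.isspace l
  rw [hLhead] at hmatch
  exact hmatch

theorem pv_main (n : ℕ) : ∀ cs : List Char, cs.length ≤ n →
    (∀ c, cs.head? = some c → PySem.Chars.isspace c = false) →
    pvGoA ((PySem.Chars.split₀ cs).map String.ofList)
      = String.ofList ((pvStar cs).takeWhile (fun d => !PySem.Chars.isspace d)) := by
  induction n with
  | zero =>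
    intro cs hlen _
    have : cs = [] := List.length_eq_zero_iff.mp (Nat.le_zero.mp hlen)
    subst this
    rw [pv_split_nil, pvStar]
    simp [pvGoA]
  | succ n ih =>
    intro cs hlen hhead
    cases hcs : cs with
    | nil => rw [pv_split_nil, pvStar]; simp [pvGoA]
    | cons c rest =>
      subst hcs
      have hc : PySem.Chars.isspace c = false := hhead c rfl
      have htok : (c :: rest).takeWhile (fun d => !PySem.Chars.isspace d)
          = c :: rest.takeWhile (fun d => !PySem.Chars.isspace d) :=
        List.takeWhile_cons_of_pos (by simp [hc])
      rw [pv_split_word hc, List.map_cons]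
      simp only [pvGoA]
      have henv := pv_env ((c :: rest).takeWhile (fun d => !PySem.Chars.isspace d))
      rw [pv_takeWhile_word (c :: rest), pv_drop_head (c :: rest)] at henv
      rw [htok] at henv
      rw [pvStar]
      by_cases hcond : (c :: rest).takeWhile pvIsWord ≠ [] ∧
          ((c :: rest).drop ((c :: rest).takeWhile pvIsWord).length).head? = some '='
      · rw [dif_pos hcond]
        have henvT : pvEnvSkipA (String.ofList (c :: rest.takeWhile (fun d => !PySem.Chars.isspace d))) = true := by
          rw [henv]
          simp [hcond.1, hcond.2]
        rw [if_pos henvT]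
        obtain ⟨hne, heq⟩ := hcond
        have hcw : pvIsWord c = true := by
          by_contra hcw
          exact hne (List.takeWhile_cons_of_neg (p := pvIsWord) (by simpa using hcw))
        have hname : (c :: rest).takeWhile pvIsWord = c :: rest.takeWhile pvIsWord :=
          List.takeWhile_cons_of_pos hcw
        have hdropm : (c :: rest).drop ((c :: rest).takeWhile pvIsWord).length
            = rest.drop (rest.takeWhile pvIsWord).length := by
          rw [hname, List.length_cons, List.drop_succ_cons]
        rw [hdropm] at heq
        have hsplit : rest.drop (rest.takeWhile pvIsWord).length
            = '=' :: rest.drop ((rest.takeWhile pvIsWord).length + 1) := by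
          cases hh : rest.drop (rest.takeWhile pvIsWord).length with
          | nil => rw [hh] at heq; simp at heq
          | cons a u =>
            rw [hh] at heq
            simp only [List.head?_cons, Option.some.injEq] at heq
            subst heq
            have : rest.drop ((rest.takeWhile pvIsWord).length + 1)
                = (rest.drop (rest.takeWhile pvIsWord).length).drop 1 := by
              rw [List.drop_drop]
            rw [this, hh, List.drop_succ_cons, List.drop_zero]
        have hrest : rest = rest.takeWhile pvIsWord ++ '=' :: rest.drop ((rest.takeWhile pvIsWord).length + 1) := by
          conv_lhs => rw [← List.takeWhile_append_dropWhile (p := pvIsWord) (l := rest)]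
          rw [pv_dropWhile_eq_drop pvIsWord rest, hsplit]
        have hT : rest.dropWhile (fun d => !PySem.Chars.isspace d)
            = (rest.drop ((rest.takeWhile pvIsWord).length + 1)).dropWhile (fun d => !PySem.Chars.isspace d) := by
          conv_lhs => rw [hrest]
          rw [show rest.takeWhile pvIsWord ++ '=' :: rest.drop ((rest.takeWhile pvIsWord).length + 1)
              = (rest.takeWhile pvIsWord ++ ['=']) ++ rest.drop ((rest.takeWhile pvIsWord).length + 1) by simp]
          apply pv_dropWhile_skip
          intro d hd
          rcases List.mem_append.mp hd with h | h
          · exact pv_word_nonspace d (List.mem_takeWhile_imp h)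
          · simp only [List.mem_singleton] at h; subst h; decide
        have hdropm1 : (c :: rest).drop (((c :: rest).takeWhile pvIsWord).length + 1)
            = rest.drop ((rest.takeWhile pvIsWord).length + 1) := by
          rw [hname, List.length_cons, List.drop_succ_cons]
        rw [hdropm1, ← hT]
        rw [← pv_split_lstrip (rest.dropWhile (fun d => !PySem.Chars.isspace d))]
        apply ih
        · have h1 := List.length_dropWhile_le PySem.Chars.isspace
            (rest.dropWhile (fun d => !PySem.Chars.isspace d))
          have h2 := List.length_dropWhile_le (fun d => !PySem.Chars.isspace d) rest
          simp only [List.length_cons] at hlen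
          omega
        · intro d hd
          have hmatch := List.head?_dropWhile_not PySem.Chars.isspace
            (rest.dropWhile (fun d => !PySem.Chars.isspace d))
          rw [hd] at hmatch
          exact hmatch
      · rw [dif_neg hcond]
        have henvF : pvEnvSkipA (String.ofList (c :: rest.takeWhile (fun d => !PySem.Chars.isspace d))) = false := by
          rw [henv]
          rcases not_and_or.mp hcond with h | h
          · simp at h
            simp [h]
          · rw [beq_eq_false_iff_ne.mpr h, Bool.and_false]
        rw [if_neg (by simp [henvF])]
        rw [← htok]

-- ===== VERDICT (by name: the statement is the Claim_ definition above) =====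
theorem extract_first_command_spec : Claim_equal_extract_first_command := by
  intro command _
  unfold Spec_extract_first_command extract_first_command extract_first_command_alt
  have h1 : PySem.Str.split₀ (PySem.Str.strip command)
      = (PySem.Chars.split₀ (PySem.Chars.strip command.toList)).map String.ofList := by
    rw [PySem.Str.split₀, PySem.Str.toList_strip]
  rw [h1]
  exact pv_main (PySem.Chars.strip command.toList).length _ le_rfl
    (fun c hc => pv_strip_head _ c hc)
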